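-- pv_equiv track=rewrite | github.com/totoLab/code-ingegneria-informatica | fondamenti1/simulazioni_esame/08022022/es3.py | statistiche_citta
-- ===== SOURCE A (Python) =====
-- def genera_filiali_prezzo(M):
--     filiali_prezzo = {}
--     for ordine in range(len(M)):
--         filiale = M[ordine][0]
--         prezzo = M[ordine][2]
--         if filiale not in filiali_prezzo:
--             filiali_prezzo[filiale] = 0
--         filiali_prezzo[filiale] += prezzo
--
--     return filiali_prezzo
--
-- def statistiche_citta(M, D):
--     filiali_prezzo = genera_filiali_prezzo(M)
--
--     citta_prezzo = {}
--     for filiale in filiali_prezzo: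
--         citta = D[filiale]
--         prezzo = filiali_prezzo[filiale]
--         if citta not in citta_prezzo:
--             citta_prezzo[citta] = 0
--         citta_prezzo[citta] += prezzo
--
--     return citta_prezzo
--
-- M = [
--     ["Filiale A", 10, 5, 8],
--     ["Filiale B", 12, 10, 12],
--     ["Filiale C", 6, 5, 4],
--     ["Filiale D", 4, 5, 4],
--     ["Filiale E", 8, 10, 7],
--     ["Filiale F", 6, 15, 5],
--     ["Filiale A", 10, 10, 9],
--     ["Filiale B", 11, 5, 11],
--     ["Filiale C", 6, 5, 5],
--     ["Filiale D", 11, 10, 10],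
-- ]
--
-- D = {
--     "Filiale A": "Cosenza",
--     "Filiale B": "Rende",
--     "Filiale C": "Reggio Calabria",
--     "Filiale D": "Rende",
--     "Filiale E": "Catanzaro",
--     "Filiale F": "Catanzaro"
-- }
-- ===== SOURCE B (Python) =====
-- def statistiche_citta(M, D):
--     citta_prezzo = {}
--     for riga in M:
--         citta = D[riga[0]]
--         citta_prezzo[citta] = citta_prezzo.get(citta, 0) + riga[2]
--     return citta_prezzo
-- ===== Notes on version B (the rewrite author's own statement) =====
-- stated objective: simpler
-- what changed: B drops the intermediate per-branch dict and the helper entirely: one direct pass over M adds each row's price straight into the per-city dict.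
import Mathlib
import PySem

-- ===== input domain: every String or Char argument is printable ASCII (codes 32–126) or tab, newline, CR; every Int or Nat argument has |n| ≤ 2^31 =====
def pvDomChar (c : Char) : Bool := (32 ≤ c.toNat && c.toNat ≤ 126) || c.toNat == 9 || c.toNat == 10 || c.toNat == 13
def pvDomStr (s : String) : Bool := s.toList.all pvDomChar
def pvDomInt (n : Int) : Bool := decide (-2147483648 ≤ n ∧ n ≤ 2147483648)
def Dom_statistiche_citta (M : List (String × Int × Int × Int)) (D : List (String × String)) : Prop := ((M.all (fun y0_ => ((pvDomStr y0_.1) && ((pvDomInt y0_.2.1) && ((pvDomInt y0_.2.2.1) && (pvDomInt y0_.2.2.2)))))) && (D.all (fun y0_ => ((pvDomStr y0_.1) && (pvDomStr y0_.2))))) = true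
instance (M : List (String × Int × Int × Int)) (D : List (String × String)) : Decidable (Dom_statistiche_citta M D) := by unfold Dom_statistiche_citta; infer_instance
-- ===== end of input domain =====

-- B replaces A's two-stage aggregation (per-branch dict, then per-city dict) by one direct
-- pass over M that adds each row's price into the per-city dict: simpler, one loop, no helper.

-- ===== PORT A =====
def genera_filiali_prezzo (M : List (String × Int × Int × Int)) : PySem.Dict String Int :=
  (PySem.List.pyRange 0 (M.length : Int) 1).foldl
    (fun fp ordine =>
      let riga := PySem.List.pyGetD M ordine ("", 0, 0, 0)
      let filiale := riga.1
      let prezzo := riga.2.2.1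
      let fp := if fp.contains filiale then fp else fp.insert filiale 0
      fp.modify filiale 0 (· + prezzo))
    PySem.Dict.empty

def statistiche_citta (M : List (String × Int × Int × Int)) (D : List (String × String)) : List (String × Int) :=
  let filiali_prezzo := genera_filiali_prezzo M
  (filiali_prezzo.keys.foldl
    (fun cp filiale =>
      let citta := ((PySem.Dict.ofList D).get? filiale).getD ""   -- D[filiale]; KeyError excluded by Pre_
      let prezzo := (filiali_prezzo.get? filiale).getD 0
      let cp := if cp.contains citta then cp else cp.insert citta 0
      cp.modify citta 0 (· + prezzo))
    PySem.Dict.empty).items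

-- ===== PORT B =====
def statistiche_citta_alt (M : List (String × Int × Int × Int)) (D : List (String × String)) : List (String × Int) :=
  (M.foldl
    (fun cp riga =>
      let citta := ((PySem.Dict.ofList D).get? riga.1).getD ""    -- D[riga[0]]; KeyError excluded by Pre_
      cp.insert citta (cp.getD citta 0 + riga.2.2.1))
    PySem.Dict.empty).items

-- ===== PRECONDITION & SPEC =====
-- Pre_ excludes exactly the inputs where Python raises KeyError (a branch name of M missing from D); both A and B raise there.
def Pre_statistiche_citta (M : List (String × Int × Int × Int)) (D : List (String × String)) : Prop :=
  ∀ r ∈ M, ((PySem.Dict.ofList D).get? r.1).isSome = true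
instance (M : List (String × Int × Int × Int)) (D : List (String × String)) : Decidable (Pre_statistiche_citta M D) := by unfold Pre_statistiche_citta; infer_instance

def pvWitness_statistiche_citta : (List (String × Int × Int × Int)) × (List (String × String)) :=
  ([("a", 1, 2, 3), ("b", 0, 5, 0), ("a", 0, 4, 0)], [("a", "X"), ("b", "X")])

def Spec_statistiche_citta (M : List (String × Int × Int × Int)) (D : List (String × String)) (out : List (String × Int)) : Prop := out = statistiche_citta_alt M D
instance (M : List (String × Int × Int × Int)) (D : List (String × String)) (out : List (String × Int)) : Decidable (Spec_statistiche_citta M D out) := by unfold Spec_statistiche_citta; infer_instance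

-- ===== CLAIM (what is proved, stated in full; the proofs are below) =====
def Claim_equal_statistiche_citta : Prop := ∀ (M : List (String × Int × Int × Int)) (D : List (String × String)), Dom_statistiche_citta M D → Pre_statistiche_citta M D → Spec_statistiche_citta M D (statistiche_citta M D)

-- ===== LEMMAS AND PROOFS =====

-- The common accumulation step 'd[k] = d.get(k, 0) + v' and its fold.
def pvStep (d : PySem.Dict String Int) (k : String) (v : Int) : PySem.Dict String Int :=
  d.insert k (d.getD k 0 + v)

def pvAcc (d : PySem.Dict String Int) (xs : List (String × Int)) : PySem.Dict String Int :=
  xs.foldl (fun d p => pvStep d p.1 p.2) d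

-- A's 'if k not in d: d[k] = 0; d[k] += v' is pvStep.
theorem pvStep_eq_mod (d : PySem.Dict String Int) (k : String) (v : Int) :
    (if d.contains k then d else d.insert k 0).modify k 0 (· + v) = pvStep d k v := by
  by_cases h : d.contains k = true
  · simp only [h, if_true]
    rfl
  · have hf : d.contains k = false := by simpa using h
    simp only [h]
    show (d.insert k 0).insert k ((d.insert k 0).getD k 0 + v) = pvStep d k v
    simp [PySem.Dict.getD_insert_self, PySem.Dict.insert_insert_self, pvStep,
      PySem.Dict.getD_of_not_contains d 0 hf]

theorem pvStep_step_self (d : PySem.Dict String Int) (k : String) (u v : Int) :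
    pvStep (pvStep d k u) k v = pvStep d k (u + v) := by
  simp [pvStep, PySem.Dict.getD_insert_self, PySem.Dict.insert_insert_self, add_assoc]

theorem pvInsert_insert_comm (d : PySem.Dict String Int) (k k2 : String) (a b : Int)
    (hk : d.contains k = true) (hne : k2 ≠ k) :
    (d.insert k a).insert k2 b = (d.insert k2 b).insert k a := by
  apply PySem.Dict.ext
  by_cases h2 : d.contains k2
  · rw [PySem.Dict.items_insert_of_contains _ _ (by simp [PySem.Dict.contains_insert, h2]),
        PySem.Dict.items_insert_of_contains _ _ hk,
        PySem.Dict.items_insert_of_contains _ _ (by simp [PySem.Dict.contains_insert, hk]),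
        PySem.Dict.items_insert_of_contains _ _ h2, List.map_map, List.map_map]
    refine List.map_congr_left (fun p _ => ?_)
    simp only [Function.comp]
    by_cases hpk : p.1 = k
    · simp [hpk, Ne.symm hne]
    · by_cases hpk2 : p.1 = k2 <;> simp [hpk, hpk2, hne]
  · have hf2 : d.contains k2 = false := by simpa using h2
    rw [PySem.Dict.items_insert_of_not_contains _ _ (by simp [PySem.Dict.contains_insert, hf2, hne]),
        PySem.Dict.items_insert_of_contains _ _ hk,
        PySem.Dict.items_insert_of_contains _ _ (by simp [PySem.Dict.contains_insert, hk]),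
        PySem.Dict.items_insert_of_not_contains _ _ hf2, List.map_append]
    simp [hne]

theorem pvStep_comm (d : PySem.Dict String Int) (k k2 : String) (v v2 : Int)
    (hk : d.contains k = true) :
    pvStep (pvStep d k v) k2 v2 = pvStep (pvStep d k2 v2) k v := by
  by_cases he : k2 = k
  · subst he
    rw [pvStep_step_self, pvStep_step_self, add_comm]
  · simp only [pvStep]
    rw [PySem.Dict.getD_insert_of_ne d _ _ he, PySem.Dict.getD_insert_of_ne d _ _ (Ne.symm he)]
    exact pvInsert_insert_comm d k k2 _ _ hk he

theorem pvAcc_step_comm (d : PySem.Dict String Int) (k : String) (v : Int)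
    (t : List (String × Int)) (hk : d.contains k = true) :
    pvAcc (pvStep d k v) t = pvStep (pvAcc d t) k v := by
  induction t generalizing d with
  | nil => rfl
  | cons p t ih =>
    show pvAcc (pvStep (pvStep d k v) p.1 p.2) t = pvStep (pvAcc (pvStep d p.1 p.2) t) k v
    rw [pvStep_comm d k p.1 v p.2 hk]
    exact ih (pvStep d p.1 p.2) (by simp [pvStep, PySem.Dict.contains_insert, hk])

theorem pvAcc_append (d : PySem.Dict String Int) (xs ys : List (String × Int)) :
    pvAcc d (xs ++ ys) = pvAcc (pvAcc d xs) ys :=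
  List.foldl_append

theorem pvAcc_nodup_keys (d : PySem.Dict String Int) (xs : List (String × Int))
    (h : d.keys.Nodup) : (pvAcc d xs).keys.Nodup :=
  PySem.Dict.nodup_keys_foldl_insert_key xs Prod.fst (fun d p => d.getD p.1 0 + p.2) d h

-- MAIN LEMMA: re-aggregating the grouped-by-key items of an accumulation, through any key
-- renaming h, gives the same dict as aggregating the renamed raw list directly.
theorem pvAcc_items_map (h : String → String) (xs : List (String × Int))
    (d : PySem.Dict String Int) :
    pvAcc d ((pvAcc PySem.Dict.empty xs).items.map (fun pr => (h pr.1, pr.2)))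
      = pvAcc d (xs.map (fun pr => (h pr.1, pr.2))) := by
  induction xs using List.reverseRecOn with
  | nil => rfl
  | append_singleton xs x ih =>
    have hnd : (pvAcc PySem.Dict.empty xs).keys.Nodup :=
      pvAcc_nodup_keys _ _ PySem.Dict.nodup_keys_empty
    set fp := pvAcc PySem.Dict.empty xs with hfp
    have hstep : pvAcc PySem.Dict.empty (xs ++ [x]) = pvStep fp x.1 x.2 := by
      rw [pvAcc_append]; rfl
    by_cases hc : fp.contains x.1
    · -- x.1 already a key of fp: its value is bumped in place
      obtain ⟨u, hu⟩ : ∃ u, (x.1, u) ∈ fp.items := by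
        have hm : x.1 ∈ fp.keys := (PySem.Dict.contains_iff_mem_keys fp x.1).mp hc
        rw [show fp.keys = fp.items.map Prod.fst from rfl] at hm
        obtain ⟨⟨k', u⟩, hp, hp1⟩ := List.mem_map.mp hm
        exact ⟨u, by simpa [show k' = x.1 from hp1] using hp⟩
      obtain ⟨l₁, l₂, hsplit⟩ := List.append_of_mem hu
      have hget : fp.getD x.1 0 = u := PySem.Dict.getD_of_mem_items fp hu hnd 0
      have hx : x.1 ∉ l₁.map Prod.fst ++ l₂.map Prod.fst := by
        have hn := hnd
        rw [show fp.keys = fp.items.map Prod.fst from rfl, hsplit] at hn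
        simp only [List.map_append, List.map_cons] at hn
        exact (List.nodup_cons.mp (List.nodup_middle.mp hn)).1
      have hx1 : ∀ p ∈ l₁, p.1 ≠ x.1 := fun p hp he =>
        hx (List.mem_append_left _ (he ▸ List.mem_map_of_mem hp))
      have hx2 : ∀ p ∈ l₂, p.1 ≠ x.1 := fun p hp he =>
        hx (List.mem_append_right _ (he ▸ List.mem_map_of_mem hp))
      have hitems : (pvStep fp x.1 x.2).items = l₁ ++ (x.1, u + x.2) :: l₂ := by
        rw [pvStep, PySem.Dict.items_insert_of_contains _ _ hc, hget, hsplit,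
          List.map_append, List.map_cons]
        congr 1
        · conv_rhs => rw [← List.map_id l₁]
          exact List.map_congr_left fun p hp => by simp [hx1 p hp]
        · congr 1
          · simp
          · conv_rhs => rw [← List.map_id l₂]
            exact List.map_congr_left fun p hp => by simp [hx2 p hp]
      rw [hstep, hitems]
      -- aggregate the bumped middle entry as two steps, push the second one to the end
      have expand : ∀ w : Int,
          pvAcc d ((l₁ ++ (x.1, w) :: l₂).map (fun pr => (h pr.1, pr.2)))
            = pvAcc (pvStep (pvAcc d (l₁.map (fun pr => (h pr.1, pr.2)))) (h x.1) w)
                (l₂.map (fun pr => (h pr.1, pr.2))) := by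
        intro w
        rw [List.map_append, pvAcc_append]; rfl
      rw [expand (u + x.2),
        ← pvStep_step_self _ _ u x.2,
        pvAcc_step_comm _ _ _ _ (by simp [pvStep]),
        ← expand u, ← hsplit, ih, List.map_append, pvAcc_append]
      rfl
    · -- fresh key: appended at the end on both sides
      have hf : fp.contains x.1 = false := by simpa using hc
      rw [hstep, pvStep, PySem.Dict.items_insert_of_not_contains _ _ hf,
        PySem.Dict.getD_of_not_contains fp 0 hf, List.map_append, pvAcc_append, ih,
        List.map_append, pvAcc_append]
      simp [pvAcc, pvStep]

-- A's first loop is pvAcc over (filiale, prezzo) pairs.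
theorem genera_eq (M : List (String × Int × Int × Int)) :
    genera_filiali_prezzo M = pvAcc PySem.Dict.empty (M.map (fun r => (r.1, r.2.2.1))) := by
  unfold genera_filiali_prezzo pvAcc
  show (PySem.List.pyRange 0 (M.length : Int) 1).foldl
      (fun fp ordine =>
        (fun fp (riga : String × Int × Int × Int) =>
            (if fp.contains riga.1 then fp else fp.insert riga.1 0).modify riga.1 0
              (· + riga.2.2.1)) fp (PySem.List.pyGetD M ordine ("", 0, 0, 0)))
      PySem.Dict.empty
    = (M.map (fun r => (r.1, r.2.2.1))).foldl (fun d p => pvStep d p.1 p.2) PySem.Dict.empty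
  rw [PySem.List.foldl_pyRange_zero_pyGetD' M ("", 0, 0, 0)
      (fun fp (riga : String × Int × Int × Int) =>
        (if fp.contains riga.1 then fp else fp.insert riga.1 0).modify riga.1 0
          (· + riga.2.2.1)) PySem.Dict.empty, List.foldl_map]
  exact PySem.List.foldl_congr_mem _ _ _ _ (fun d r _ => pvStep_eq_mod d r.1 r.2.2.1)

-- The D[...] lookup shared by both programs, as a named function for the proofs.
def pvLk (D : List (String × String)) (f : String) : String :=
  ((PySem.Dict.ofList D).get? f).getD ""

-- ===== VERDICT (by name: the statement is the Claim_ definition above) =====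
theorem statistiche_citta_spec : Claim_equal_statistiche_citta := by
  intro M D _ _
  show statistiche_citta M D = statistiche_citta_alt M D
  have hnd : (genera_filiali_prezzo M).keys.Nodup := by
    rw [genera_eq]; exact pvAcc_nodup_keys _ _ PySem.Dict.nodup_keys_empty
  have hA : statistiche_citta M D =
      (pvAcc PySem.Dict.empty ((genera_filiali_prezzo M).items.map
        (fun pr => (pvLk D pr.1, pr.2)))).items := by
    show ((genera_filiali_prezzo M).keys.foldl
        (fun cp filiale =>
          (if cp.contains (pvLk D filiale) then cp
           else cp.insert (pvLk D filiale) 0).modify (pvLk D filiale) 0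
            (· + ((genera_filiali_prezzo M).get? filiale).getD 0))
        PySem.Dict.empty).items
      = (((genera_filiali_prezzo M).items.map (fun pr => (pvLk D pr.1, pr.2))).foldl
          (fun d p => pvStep d p.1 p.2) PySem.Dict.empty).items
    rw [show (genera_filiali_prezzo M).keys = (genera_filiali_prezzo M).items.map Prod.fst from rfl,
      List.foldl_map, List.foldl_map]
    congr 1
    refine PySem.List.foldl_congr_mem _ _ _ _ (fun cp pr hpr => ?_)
    rw [PySem.Dict.get?_of_mem_items _ hpr hnd]
    exact pvStep_eq_mod cp (pvLk D pr.1) pr.2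
  have hB : statistiche_citta_alt M D =
      (pvAcc PySem.Dict.empty ((M.map (fun r => (r.1, r.2.2.1))).map
        (fun pr => (pvLk D pr.1, pr.2)))).items := by
    show (M.foldl
        (fun cp riga => cp.insert (pvLk D riga.1) (cp.getD (pvLk D riga.1) 0 + riga.2.2.1))
        PySem.Dict.empty).items
      = (((M.map (fun r => (r.1, r.2.2.1))).map (fun pr => (pvLk D pr.1, pr.2))).foldl
          (fun d p => pvStep d p.1 p.2) PySem.Dict.empty).items
    rw [List.foldl_map, List.foldl_map]
    rfl
  rw [hA, hB, genera_eq M]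
  exact congrArg PySem.Dict.items
    (pvAcc_items_map (pvLk D) (M.map (fun r => (r.1, r.2.2.1))) PySem.Dict.empty)
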